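-- pv_equiv track=rewrite | github.com/aronweiler/rad-sec-analysis | src/tools/nvd_tool.py | _generate_broad_search_terms
-- ===== SOURCE A (Python) =====
-- from typing import List, Dict, Any, Optional, Tuple, Set
--
-- def _generate_broad_search_terms(name: str) -> List[str]:
--     """Generate broad search terms as last resort (more restrictive than before)"""
--     name_lower = name.lower()
--     broad_terms = []
--
--     # Extract significant words (longer than 4 characters to be more restrictive)
--     words = [word for word in name_lower.split() if len(word) > 4]
--
--     # Use only the longest/most specific word to avoid too many irrelevant results
--     if words:
--         words.sort(key=len, reverse=True)
--         broad_terms.append(words[0])  # Take only the longest word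
--
--     return broad_terms
-- ===== SOURCE B (Python) =====
-- def _generate_broad_search_terms(name: str) -> list:
--     words = [w for w in name.lower().split() if len(w) > 4]
--     return [max(words, key=len)] if words else []
-- ===== Notes on version B (the rewrite author's own statement) =====
-- stated objective: faster
-- what changed: Replaces the in-place descending sort-by-length plus [0] indexing with a single linear max(words, key=len) pass (first maximal element, same tie-break as the stable sort).
import Mathlib
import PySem

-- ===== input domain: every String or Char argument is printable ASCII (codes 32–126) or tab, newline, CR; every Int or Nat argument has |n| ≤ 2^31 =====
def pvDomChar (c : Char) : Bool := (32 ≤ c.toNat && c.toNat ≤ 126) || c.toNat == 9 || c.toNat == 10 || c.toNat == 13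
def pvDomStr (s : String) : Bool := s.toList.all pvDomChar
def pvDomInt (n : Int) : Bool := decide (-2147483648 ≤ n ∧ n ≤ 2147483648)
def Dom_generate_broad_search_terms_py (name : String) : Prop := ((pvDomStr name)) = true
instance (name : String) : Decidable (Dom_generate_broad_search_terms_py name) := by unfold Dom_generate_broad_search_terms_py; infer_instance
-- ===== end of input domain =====

-- B replaces A's descending sort-by-length + [0] indexing with a single linear max-by-length pass (same first-maximal tie-break).

-- ===== PORT A =====
def generate_broad_search_terms_py (name : String) : List String :=
  let name_lower := PySem.Str.lower name
  let broad_terms : List String := []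
  let words := (PySem.Str.split₀ name_lower).filter (fun w => PySem.Str.len w > 4)
  if words.isEmpty then broad_terms
  else
    let ws := PySem.List.sorted words (fun w => PySem.Str.len w) true
    broad_terms ++ [ws.headI]   -- words[0] after the in-place sort; ws nonempty here

-- ===== PORT B =====
def generate_broad_search_terms_py_alt (name : String) : List String :=
  let words := (PySem.Str.split₀ (PySem.Str.lower name)).filter (fun w => PySem.Str.len w > 4)
  match PySem.List.max? words (fun w => PySem.Str.len w) with
  | some m => [m]
  | none => []

-- ===== PRECONDITION & SPEC =====
def Spec_generate_broad_search_terms_py (name : String) (out : List String) : Prop := out = generate_broad_search_terms_py_alt name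
instance (name : String) (out : List String) : Decidable (Spec_generate_broad_search_terms_py name out) := by unfold Spec_generate_broad_search_terms_py; infer_instance

-- ===== CLAIM (what is proved, stated in full; the proofs are below) =====
def Claim_equal_generate_broad_search_terms_py : Prop := ∀ (name : String), Dom_generate_broad_search_terms_py name → Spec_generate_broad_search_terms_py name (generate_broad_search_terms_py name)

-- ===== LEMMAS AND PROOFS =====

-- head of a stable descending insert = the running-max step
theorem head?_insertBy_rev {α κ : Type} [LinearOrder κ] (key : α → κ) (x : α) (acc : List α) :
    (PySem.List.insertBy (fun a b => decide (key b < key a)) x acc).head? =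
      match acc.head? with
      | none => some x
      | some m => if key m < key x then some x else some m := by
  cases acc with
  | nil => simp [PySem.List.insertBy]
  | cons y ys =>
    simp only [PySem.List.insertBy, List.head?]
    by_cases h : key y < key x <;> simp [h]

-- the loop invariant: head of the descending insertion-sort fold = max? fold
theorem head?_foldl_insertBy {α κ : Type} [LinearOrder κ] (key : α → κ) (xs acc : List α) :
    (xs.foldl (fun acc x => PySem.List.insertBy (fun a b => decide (key b < key a)) x acc) acc).head? =
      xs.foldl (fun m x =>
        match m with
        | none => some x
        | some m => if key m < key x then some x else some m) acc.head? := by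
  induction xs generalizing acc with
  | nil => rfl
  | cons x t ih =>
    simp only [List.foldl]
    rw [ih, head?_insertBy_rev]

theorem head?_sorted_rev_eq_max? {α κ : Type} [LinearOrder κ] (xs : List α) (key : α → κ) :
    (PySem.List.sorted xs key true).head? = PySem.List.max? xs key := by
  simp only [PySem.List.sorted, PySem.List.max?]
  exact head?_foldl_insertBy key xs []

-- ===== VERDICT (by name: the statement is the Claim_ definition above) =====
theorem generate_broad_search_terms_py_spec : Claim_equal_generate_broad_search_terms_py := by
  intro name _
  unfold Spec_generate_broad_search_terms_py generate_broad_search_terms_py generate_broad_search_terms_py_alt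
  simp only []
  set words := (PySem.Str.split₀ (PySem.Str.lower name)).filter (fun w => PySem.Str.len w > 4) with hw
  by_cases h : words.isEmpty
  · rw [if_pos h]
    have : words = [] := List.isEmpty_iff.mp h
    rw [this]
    rfl
  · rw [if_neg h]
    have hne : words ≠ [] := fun c => h (by simp [c])
    have hmax := head?_sorted_rev_eq_max? words (fun w => PySem.Str.len w)
    have hsne : PySem.List.sorted words (fun w => PySem.Str.len w) true ≠ [] := by
      simp only [ne_eq, PySem.List.sorted_eq_nil_iff]; exact hne
    cases hs : PySem.List.sorted words (fun w => PySem.Str.len w) true with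
    | nil => exact absurd hs hsne
    | cons m t =>
      rw [hs] at hmax
      simp only [List.head?] at hmax
      rw [← hmax]
      simp
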